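-- pv_equiv track=rewrite | github.com/adnan1975/probuy-pricing | api/app/services/shopify/client.py | _extract_operation_name
-- ===== SOURCE A (Python) =====
-- def _extract_operation_name(query: str) -> str:
--     text = (query or "").strip().splitlines()
--     for line in text:
--         line = line.strip()
--         if line.startswith("mutation ") or line.startswith("query "):
--             parts = line.split()
--             if len(parts) >= 2:
--                 return parts[1].split("(")[0].strip("{")
--     return "anonymous"
-- ===== SOURCE B (Python) =====
-- def _extract_operation_name(query: str) -> str:
--     def op_name(line):
--         s = line.strip()
--         for kw in ("mutation ", "query "):
--             if s.startswith(kw):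
--                 return s[len(kw):].split()[0].split("(")[0].strip("{")
--         return None
--
--     lines = (query or "").strip().splitlines()
--     return next((n for n in map(op_name, lines) if n is not None), "anonymous")
-- ===== Notes on version B (the rewrite author's own statement) =====
-- stated objective: simpler
-- what changed: A's early-return loop with a prefix test, a full whitespace-split of the line and a length guard is replaced by an Option-valued per-line helper that slices the keyword off and takes the first word of the remainder, searched with a first-match (next over a generator); the length guard disappears.
import Mathlib
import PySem

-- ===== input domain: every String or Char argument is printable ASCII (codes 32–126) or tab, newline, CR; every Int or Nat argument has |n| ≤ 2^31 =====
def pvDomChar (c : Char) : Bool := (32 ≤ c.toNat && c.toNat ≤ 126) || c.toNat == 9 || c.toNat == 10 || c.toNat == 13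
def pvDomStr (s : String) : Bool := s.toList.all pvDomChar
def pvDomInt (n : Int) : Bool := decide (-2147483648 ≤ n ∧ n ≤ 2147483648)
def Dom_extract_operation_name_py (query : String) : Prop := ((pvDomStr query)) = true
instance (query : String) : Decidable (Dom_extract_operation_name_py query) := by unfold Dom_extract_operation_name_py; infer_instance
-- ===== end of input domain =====

-- B replaces A's prefix-test + full-line whitespace-split + length-guard + early-return loop by an
-- Option-valued per-line helper (keyword removed by slicing) searched with first-match; objective: simpler.

-- ===== PORT A =====
-- the 'for line in text' loop with its early return
def pvALoop (lines : List String) : String :=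
  match lines with
  | [] => "anonymous"
  | line :: rest =>
    let l := PySem.Str.strip line
    if PySem.Str.startswith l "mutation " || PySem.Str.startswith l "query " then
      let parts := PySem.Str.split₀ l
      if 2 ≤ parts.length then
        PySem.Str.stripChars
          ((PySem.List.pyGet? ((PySem.Str.split? ((PySem.List.pyGet? parts 1).getD "") "(").getD []) 0).getD "") "{"
      else pvALoop rest
    else pvALoop rest

def extract_operation_name_py (query : String) : String :=
  pvALoop (PySem.Str.splitlines (PySem.Str.strip query))

-- ===== PORT B =====
-- rest.split()[0].split("(")[0].strip("{")
def pvBName (rest : String) : String :=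
  PySem.Str.stripChars
    ((PySem.List.pyGet?
        ((PySem.Str.split? ((PySem.List.pyGet? (PySem.Str.split₀ rest) 0).getD "") "(").getD []) 0).getD "") "{"

-- op_name(line): the keyword loop, unrolled over the two keywords
def pvOpName (line : String) : Option String :=
  let s := PySem.Str.strip line
  if PySem.Str.startswith s "mutation " then
    some (pvBName (PySem.Str.slice s (some 9) none))
  else if PySem.Str.startswith s "query " then
    some (pvBName (PySem.Str.slice s (some 6) none))
  else
    none

def extract_operation_name_py_alt (query : String) : String :=
  ((PySem.Str.splitlines (PySem.Str.strip query)).findSome? pvOpName).getD "anonymous"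

-- ===== PRECONDITION & SPEC =====
def Spec_extract_operation_name_py (query : String) (out : String) : Prop := out = extract_operation_name_py_alt query
instance (query : String) (out : String) : Decidable (Spec_extract_operation_name_py query out) := by unfold Spec_extract_operation_name_py; infer_instance

-- ===== CLAIM (what is proved, stated in full; the proofs are below) =====
def Claim_equal_extract_operation_name_py : Prop := ∀ (query : String), Dom_extract_operation_name_py query → Spec_extract_operation_name_py query (extract_operation_name_py query)

-- ===== LEMMAS AND PROOFS =====

-- head of dropWhile does not satisfy the predicate
theorem pvHead_dropWhile {α : Type} (p : α → Bool) (l : List α) (a : α)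
    (h : (l.dropWhile p).head? = some a) : p a = false := by
  induction l with
  | nil => simp [List.dropWhile] at h
  | cons x xs ih =>
    by_cases hx : p x
    · rw [List.dropWhile_cons_of_pos hx] at h; exact ih h
    · rw [List.dropWhile_cons_of_neg hx] at h
      simp at h
      subst h
      exact eq_false_of_ne_true hx

-- the last character of a stripped string is not whitespace
theorem pvStrip_getLast (cs : List Char) (a : Char)
    (h : (PySem.Chars.strip cs).getLast? = some a) : PySem.Chars.isspace a = false := by
  unfold PySem.Chars.strip PySem.Chars.rstrip at h
  rw [List.getLast?_reverse] at h
  exact pvHead_dropWhile _ _ _ h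

-- split₀.go: the accumulator is prepended (reversed)
theorem pvGo_acc (t : List Char) (cur : List Char) (acc : List (List Char)) :
    PySem.Chars.split₀.go t cur acc = acc.reverse ++ PySem.Chars.split₀.go t cur [] := by
  induction t generalizing cur acc with
  | nil =>
    rw [PySem.Chars.split₀.go.eq_def, PySem.Chars.split₀.go.eq_def]
    by_cases hc : cur.isEmpty = true
    · simp [hc]
    · have hc' : cur.isEmpty = false := by simpa using hc
      simp [hc']
  | cons c rest ih =>
    rw [PySem.Chars.split₀.go.eq_def]
    conv_rhs => rw [PySem.Chars.split₀.go.eq_def]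
    by_cases hsp : PySem.Chars.isspace c = true
    · by_cases hc : cur.isEmpty = true
      · simp only [hsp, hc, if_true]
        exact ih [] acc
      · have hc' : cur.isEmpty = false := by simpa using hc
        simp only [hsp, hc', if_true, Bool.false_eq_true, if_false]
        rw [ih [] (cur.reverse :: acc), ih [] [cur.reverse]]
        simp
    · have hsp' : PySem.Chars.isspace c = false := by simpa using hsp
      simp only [hsp', Bool.false_eq_true, if_false]
      exact ih _ _

-- split₀.go over a run of non-space characters pushes them onto cur
theorem pvGo_nonspace (w : List Char) (hns : ∀ c ∈ w, PySem.Chars.isspace c = false) :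
    ∀ (t cur : List Char) (acc : List (List Char)),
      PySem.Chars.split₀.go (w ++ t) cur acc = PySem.Chars.split₀.go t (w.reverse ++ cur) acc := by
  induction w with
  | nil => intro t cur acc; simp
  | cons c rest ih =>
    intro t cur acc
    have hc : PySem.Chars.isspace c = false := hns c (by simp)
    rw [List.cons_append, PySem.Chars.split₀.go.eq_def]
    simp only [hc, Bool.false_eq_true, if_false]
    rw [ih (fun d hd => hns d (by simp [hd])) t (c :: cur) acc]
    simp

-- split₀.go is nonempty when cur or acc is
theorem pvGo_ne_nil (t : List Char) (cur : List Char) (acc : List (List Char))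
    (h : cur ≠ [] ∨ acc ≠ []) : PySem.Chars.split₀.go t cur acc ≠ [] := by
  induction t generalizing cur acc with
  | nil =>
    rw [PySem.Chars.split₀.go.eq_def]
    by_cases hc : cur.isEmpty = true
    · have hcur : cur = [] := by simpa [List.isEmpty_iff] using hc
      have hacc : acc ≠ [] := by
        rcases h with h | h
        · exact absurd hcur h
        · exact h
      simp [hc, hacc]
    · have hc' : cur.isEmpty = false := by simpa using hc
      simp [hc']
  | cons c rest ih =>
    rw [PySem.Chars.split₀.go.eq_def]
    by_cases hsp : PySem.Chars.isspace c = true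
    · by_cases hc : cur.isEmpty = true
      · have hcur : cur = [] := by simpa [List.isEmpty_iff] using hc
        have hacc : acc ≠ [] := by
          rcases h with h | h
          · exact absurd hcur h
          · exact h
        simp only [hsp, hc, if_true]
        exact ih [] acc (Or.inr hacc)
      · have hc' : cur.isEmpty = false := by simpa using hc
        simp only [hsp, hc', if_true, Bool.false_eq_true, if_false]
        exact ih [] _ (Or.inr (by simp))
    · have hsp' : PySem.Chars.isspace c = false := by simpa using hsp
      simp only [hsp', Bool.false_eq_true, if_false]
      exact ih (c :: cur) acc (Or.inl (by simp))

-- split₀ of a string containing a non-space character is nonempty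
theorem pvSplit₀_ne_nil (t : List Char) (h : ∃ c ∈ t, PySem.Chars.isspace c = false) :
    PySem.Chars.split₀ t ≠ [] := by
  unfold PySem.Chars.split₀
  induction t with
  | nil => simp at h
  | cons c rest ih =>
    rw [PySem.Chars.split₀.go.eq_def]
    by_cases hsp : PySem.Chars.isspace c = true
    · simp only [hsp, if_true, List.isEmpty_nil]
      apply ih
      obtain ⟨a, ha, hans⟩ := h
      rcases List.mem_cons.1 ha with rfl | h1
      · rw [hsp] at hans; cases hans
      · exact ⟨a, h1, hans⟩
    · have hsp' : PySem.Chars.isspace c = false := by simpa using hsp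
      simp only [hsp', Bool.false_eq_true, if_false]
      exact pvGo_ne_nil rest [c] [] (Or.inl (by simp))

-- split₀ of "<word> <tail>" (word nonempty, no whitespace) = word :: split₀ tail
theorem pvSplit₀_keyword (w t : List Char) (hw : w ≠ [])
    (hns : ∀ c ∈ w, PySem.Chars.isspace c = false) :
    PySem.Chars.split₀ (w ++ ' ' :: t) = w :: PySem.Chars.split₀ t := by
  unfold PySem.Chars.split₀
  rw [pvGo_nonspace w hns (' ' :: t) [] []]
  rw [PySem.Chars.split₀.go.eq_def]
  have hsp : PySem.Chars.isspace ' ' = true := by decide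
  have hcur : (w.reverse ++ ([] : List Char)).isEmpty = false := by
    simp [List.isEmpty_iff, hw]
  simp only [hsp, hcur, if_true, Bool.false_eq_true, if_false]
  rw [pvGo_acc t [] _]
  try simp

-- x :: l indexed at 1 is l indexed at 0
theorem pvPyGet_one {α : Type} (x : α) (l : List α) (d : α) :
    (PySem.List.pyGet? (x :: l) 1).getD d = (PySem.List.pyGet? l 0).getD d := by
  have h1 := PySem.List.pyGet?_natCast (x :: l) 1
  have h0 := PySem.List.pyGet?_natCast l 0
  norm_num at h1 h0
  rw [h1, h0]
  try simp

-- the keyword case: A's parts[1] is B's first word of the sliced-off tail, and parts has ≥ 2 words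
theorem pvKeywordCase (kw s : String)
    (hw : kw.toList ≠ []) (hns : ∀ c ∈ kw.toList, PySem.Chars.isspace c = false)
    (hlast : ∀ a, s.toList.getLast? = some a → PySem.Chars.isspace a = false)
    (h : PySem.Str.startswith s (kw ++ " ") = true) :
    (2 ≤ (PySem.Str.split₀ s).length) ∧
      (PySem.List.pyGet? (PySem.Str.split₀ s) 1).getD "" =
        (PySem.List.pyGet?
            (PySem.Str.split₀ (PySem.Str.slice s (some ((kw.length : Int) + 1)) none)) 0).getD "" := by
  rw [PySem.Str.startswith_eq, PySem.Chars.startswith_iff] at h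
  obtain ⟨t, ht⟩ := h
  have htl : s.toList = kw.toList ++ ' ' :: t := by
    rw [← ht, String.toList_append]
    simp
  have hmem : ∃ c ∈ t, PySem.Chars.isspace c = false := by
    rcases List.eq_nil_or_concat t with rfl | ⟨t', a, rfl⟩
    · exfalso
      have hl : s.toList.getLast? = some ' ' := by
        rw [htl]
        exact List.getLast?_concat
      have := hlast ' ' hl
      simp [PySem.Chars.isspace] at this
    · have hl : s.toList.getLast? = some a := by
        rw [htl, List.concat_eq_append]
        rw [show kw.toList ++ ' ' :: (t' ++ [a]) = (kw.toList ++ ' ' :: t') ++ [a] by simp]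
        exact List.getLast?_concat
      exact ⟨a, by simp [List.concat_eq_append], hlast a hl⟩
  have hsplit : PySem.Chars.split₀ s.toList = kw.toList :: PySem.Chars.split₀ t := by
    rw [htl]
    exact pvSplit₀_keyword _ _ hw hns
  have hparts : PySem.Str.split₀ s = kw :: (PySem.Chars.split₀ t).map String.ofList := by
    unfold PySem.Str.split₀
    rw [hsplit]
    simp
  have hslice : (PySem.Str.slice s (some ((kw.length : Int) + 1)) none).toList = t := by
    rw [show (PySem.Str.slice s (some ((kw.length : Int) + 1)) none).toList
          = PySem.Chars.slice s.toList (some ((kw.length : Int) + 1)) none from by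
        simp [PySem.Str.slice, String.toList_ofList]]
    rw [PySem.Chars.slice_eq_listSlice]
    rw [PySem.List.slice_from _ (by positivity)]
    rw [htl, show kw.toList ++ ' ' :: t = (kw.toList ++ [' ']) ++ t by simp]
    have hlen : kw.toList.length = kw.length := String.length_toList
    rw [show ((kw.length : Int) + 1).toNat = (kw.toList ++ [' ']).length by
      simp only [List.length_append, List.length_cons, List.length_nil]
      omega]
    exact List.drop_left
  have hsl : PySem.Str.split₀ (PySem.Str.slice s (some ((kw.length : Int) + 1)) none) =
      (PySem.Chars.split₀ t).map String.ofList := by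
    unfold PySem.Str.split₀
    rw [hslice]
  constructor
  · rw [hparts]
    cases h' : PySem.Chars.split₀ t with
    | nil => exact absurd h' (pvSplit₀_ne_nil t hmem)
    | cons x xs => simp only [List.map_cons, List.length_cons, List.length_map]; omega
  · rw [hparts, hsl]
    exact pvPyGet_one _ _ _

-- the two keywords contain no whitespace (evaluated by rfl, then converted)
theorem pvMutAll : "mutation".toList.all (fun c => !PySem.Chars.isspace c) = true := by rfl

theorem pvQryAll : "query".toList.all (fun c => !PySem.Chars.isspace c) = true := by rfl

theorem pvNoSpace (w : String) (hall : w.toList.all (fun c => !PySem.Chars.isspace c) = true) :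
    ∀ c ∈ w.toList, PySem.Chars.isspace c = false := by
  intro c hc
  have := List.all_eq_true.1 hall c hc
  simpa using this

-- one step of A's loop equals one step of B's search
set_option maxHeartbeats 1000000 in
theorem pvStep (line : String) (rest : List String) :
    pvALoop (line :: rest) =
      (match pvOpName line with
       | some r => r
       | none => pvALoop rest) := by
  have hlastp : ∀ a, (PySem.Str.strip line).toList.getLast? = some a → PySem.Chars.isspace a = false := by
    intro a ha
    rw [PySem.Str.toList_strip] at ha
    exact pvStrip_getLast line.toList a ha
  unfold pvALoop pvOpName
  by_cases hm : PySem.Str.startswith (PySem.Str.strip line) "mutation " = true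
  · have happ : ("mutation" ++ " " : String) = "mutation " := by rfl
    have hk := pvKeywordCase "mutation" (PySem.Str.strip line) (by simp) (pvNoSpace _ pvMutAll) hlastp
      (by rw [happ]; exact hm)
    have h9 : (("mutation".length : Int) + 1) = 9 := by rfl
    rw [h9] at hk
    simp only [hm, Bool.true_or, if_true]
    rw [if_pos hk.1]
    simp only [pvBName]
    rw [hk.2]
  · have hm' : PySem.Str.startswith (PySem.Str.strip line) "mutation " = false := by simpa using hm
    by_cases hq : PySem.Str.startswith (PySem.Str.strip line) "query " = true
    · have happ : ("query" ++ " " : String) = "query " := by rfl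
      have hk := pvKeywordCase "query" (PySem.Str.strip line) (by simp) (pvNoSpace _ pvQryAll) hlastp
        (by rw [happ]; exact hq)
      have h6 : (("query".length : Int) + 1) = 6 := by rfl
      rw [h6] at hk
      simp only [hm', hq, Bool.false_or, if_true, Bool.false_eq_true, if_false]
      rw [if_pos hk.1]
      simp only [pvBName]
      rw [hk.2]
    · have hq' : PySem.Str.startswith (PySem.Str.strip line) "query " = false := by simpa using hq
      simp only [hm', hq', Bool.or_self, Bool.false_eq_true, if_false]
      exact pvALoop.eq_def rest

theorem pvLoop_eq (lines : List String) :
    pvALoop lines = (lines.findSome? pvOpName).getD "anonymous" := by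
  induction lines with
  | nil => simp [pvALoop]
  | cons line rest ih =>
    rw [pvStep, List.findSome?_cons]
    rcases h : pvOpName line with _ | r
    · simpa using ih
    · simp

-- ===== VERDICT (by name: the statement is the Claim_ definition above) =====
theorem extract_operation_name_py_spec : Claim_equal_extract_operation_name_py := by
  intro query _
  unfold Spec_extract_operation_name_py extract_operation_name_py extract_operation_name_py_alt
  exact pvLoop_eq _
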